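-- pv_equiv track=rewrite | github.com/Fed-nero/archive_text | hard_task_mjk.py | find_min_l
-- ===== SOURCE A (Python) =====
-- def find_min_l(l):
--     l_sum = []
--     for l_inside_l in l:
--         l_sum.append(sum(l_inside_l))
--
--     def i(l, value):
--         for i, v in enumerate(l):
--             if v == value:
--                 return i
--
--     return i(l_sum, min(l_sum))
-- ===== SOURCE B (Python) =====
-- def find_min_l(l):
--     best_i, best_s = 0, sum(l[0])
--     for i, row in enumerate(l[1:], 1):
--         s = sum(row)
--         if s < best_s:
--             best_i, best_s = i, s
--     return best_i
-- ===== Notes on version B (the rewrite author's own statement) =====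
-- stated objective: simpler
-- what changed: Replaces the build-all-sums list, min() pass and separate first-index scan with one enumerate pass keeping the best index and its sum (strict < keeps the first index on ties).
import Mathlib
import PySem

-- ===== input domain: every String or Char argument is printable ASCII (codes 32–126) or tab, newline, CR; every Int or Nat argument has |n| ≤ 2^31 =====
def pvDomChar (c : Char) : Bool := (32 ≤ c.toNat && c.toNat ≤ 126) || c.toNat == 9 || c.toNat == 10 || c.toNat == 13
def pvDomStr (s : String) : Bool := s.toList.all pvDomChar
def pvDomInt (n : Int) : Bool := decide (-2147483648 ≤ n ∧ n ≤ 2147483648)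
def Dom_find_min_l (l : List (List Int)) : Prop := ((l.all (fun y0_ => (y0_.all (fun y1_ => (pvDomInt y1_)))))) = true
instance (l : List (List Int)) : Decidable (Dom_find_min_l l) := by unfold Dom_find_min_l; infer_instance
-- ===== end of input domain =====

-- B replaces A's three passes (sums list, min(), index scan) by one enumerate pass
-- keeping the best index and sum; return values agree on every non-empty list.

-- ===== PORT A =====
def find_min_l (l : List (List Int)) : Int :=
  let l_sum := l.foldl (fun acc x => acc ++ [x.sum]) ([] : List Int)
  match PySem.List.min? l_sum (fun x => x) with
  | none => 0      -- min([]) raises ValueError; excluded by Pre_find_min_l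
  | some m =>
    match PySem.List.index? l_sum m with
    | some i => (i : Int)
    | none => 0    -- unreachable: the minimum is a member of l_sum

-- ===== PORT B =====
def find_min_l_alt (l : List (List Int)) : Int :=
  match l with
  | [] => 0        -- l[0] raises IndexError; excluded by Pre_find_min_l
  | x :: xs =>
    (xs.foldl (fun (st : Int × Int × Int) row =>
        let s := row.sum
        if s < st.2.1 then (st.2.2, s, st.2.2 + 1) else (st.1, st.2.1, st.2.2 + 1))
      (0, x.sum, 1)).1

-- ===== PRECONDITION & SPEC =====
-- A raises ValueError (min of an empty sequence) on the empty list; B raises IndexError there.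
def Pre_find_min_l (l : List (List Int)) : Prop := l ≠ []
instance (l : List (List Int)) : Decidable (Pre_find_min_l l) := by unfold Pre_find_min_l; infer_instance
def pvWitness_find_min_l : List (List Int) := [[3, -1], [2], []]
def Spec_find_min_l (l : List (List Int)) (out : Int) : Prop := out = find_min_l_alt l
instance (l : List (List Int)) (out : Int) : Decidable (Spec_find_min_l l out) := by unfold Spec_find_min_l; infer_instance

-- ===== CLAIM (what is proved, stated in full; the proofs are below) =====
def Claim_equal_find_min_l : Prop := ∀ (l : List (List Int)), Dom_find_min_l l → Pre_find_min_l l → Spec_find_min_l l (find_min_l l)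

-- ===== LEMMAS AND PROOFS =====

-- A's append loop builds the list of row sums.
theorem sums_foldl (l : List (List Int)) (acc : List Int) :
    l.foldl (fun acc x => acc ++ [x.sum]) acc = acc ++ l.map List.sum := by
  induction l generalizing acc with
  | nil => simp
  | cons x xs ih => simp [List.foldl, ih]

-- the recursion B's fold performs, on the (already summed) tail
def fold3 (st : Int × Int × Int) : List Int → Int × Int × Int
  | [] => st
  | s :: r => if s < st.2.1 then fold3 (st.2.2, s, st.2.2 + 1) r else fold3 (st.1, st.2.1, st.2.2 + 1) r

theorem alt_fold_eq_fold3 (xs : List (List Int)) (st : Int × Int × Int) :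
    xs.foldl (fun (st : Int × Int × Int) row =>
        let s := row.sum
        if s < st.2.1 then (st.2.2, s, st.2.2 + 1) else (st.1, st.2.1, st.2.2 + 1)) st
      = fold3 st (xs.map List.sum) := by
  induction xs generalizing st with
  | nil => simp [fold3]
  | cons x xs ih => simp only [List.foldl, List.map, fold3]; split_ifs <;> exact ih _

theorem foldl_min_le (r : List Int) (a : Int) : r.foldl min a ≤ a := by
  induction r generalizing a with
  | nil => simp
  | cons s r ih => exact le_trans (ih (min a s)) (min_le_left a s)

theorem foldl_min_mem (r : List Int) (a : Int) : r.foldl min a = a ∨ r.foldl min a ∈ r := by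
  induction r generalizing a with
  | nil => simp
  | cons s r ih =>
    rcases ih (min a s) with h | h
    · rcases le_or_gt a s with hle | hgt
      · left; simpa [min_eq_left hle] using h
      · right; simp only [List.foldl]; rw [h]; simp [min_eq_right (le_of_lt hgt)]
    · right; exact List.mem_cons_of_mem _ h

-- main characterisation of the single-pass fold against min-then-index
theorem fold3_char (r : List Int) (m b i : Int) :
    (fold3 (b, m, i) r).1 =
      if r.foldl min m < m then i + ((PySem.List.index? r (r.foldl min m)).getD 0 : Nat)
      else b := by
  induction r generalizing m b i with
  | nil => simp [fold3]
  | cons s r ih =>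
    simp only [fold3, List.foldl]
    by_cases hs : s < m
    · rw [if_pos hs, ih]
      have hms : min m s = s := min_eq_right (le_of_lt hs)
      rw [hms]
      have hle : r.foldl min s ≤ s := foldl_min_le r s
      by_cases h2 : r.foldl min s < s
      · rw [if_pos h2, if_pos (lt_trans h2 hs)]
        have hne : s ≠ r.foldl min s := ne_of_gt h2
        rw [PySem.List.index?_cons_of_ne _ hne]
        rcases foldl_min_mem r s with he | hm
        · omega
        · rcases (PySem.List.index?_isSome_iff _ _).mpr hm with _
          have : (PySem.List.index? r (r.foldl min s)).isSome := (PySem.List.index?_isSome_iff _ _).mpr hm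
          rcases Option.isSome_iff_exists.mp this with ⟨j, hj⟩
          rw [hj]; simp; ring
      · have he : r.foldl min s = s := le_antisymm hle (not_lt.mp h2)
        rw [if_neg h2, if_pos (by rw [he]; exact hs), he, PySem.List.index?_cons_self]
        simp
    · rw [if_neg hs, ih]
      have hms : min m s = m := min_eq_left (not_lt.mp hs)
      rw [hms]
      by_cases h2 : r.foldl min m < m
      · rw [if_pos h2, if_pos h2]
        have hne : s ≠ r.foldl min m := by
          have := not_lt.mp hs; omega
        rw [PySem.List.index?_cons_of_ne _ hne]
        rcases foldl_min_mem r m with he | hm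
        · omega
        · have : (PySem.List.index? r (r.foldl min m)).isSome := (PySem.List.index?_isSome_iff _ _).mpr hm
          rcases Option.isSome_iff_exists.mp this with ⟨j, hj⟩
          rw [hj]; simp; ring
      · rw [if_neg h2, if_neg h2]

-- ===== VERDICT (by name: the statement is the Claim_ definition above) =====
theorem find_min_l_spec : Claim_equal_find_min_l := by
  intro l _ hpre
  unfold Spec_find_min_l find_min_l find_min_l_alt
  match l with
  | [] => exact absurd rfl hpre
  | x :: xs =>
    simp only [sums_foldl, List.nil_append, List.map, alt_fold_eq_fold3,
      PySem.List.min?_id_cons, fold3_char]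
    set M := (xs.map List.sum).foldl min x.sum with hM
    by_cases h : M < x.sum
    · rw [if_pos h]
      have hne : x.sum ≠ M := ne_of_gt h
      rw [PySem.List.index?_cons_of_ne _ hne]
      rcases foldl_min_mem (xs.map List.sum) x.sum with he | hm
      · omega
      · have : (PySem.List.index? (xs.map List.sum) M).isSome :=
          (PySem.List.index?_isSome_iff _ _).mpr hm
        rcases Option.isSome_iff_exists.mp this with ⟨j, hj⟩
        rw [hj]; simp; ring
    · have he : M = x.sum := le_antisymm (foldl_min_le _ _) (not_lt.mp h)
      rw [if_neg h, he, PySem.List.index?_cons_self]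
      rfl
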